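-- pv_equiv track=rewrite | github.com/wigno22/MondrianAlgorithm | kanon.py | is_k_anon
-- ===== SOURCE A (Python) =====
-- def is_k_anon(dataset, attrs, k):
--
--     groups = {} # dictionary
--     '''
--     create a dictionary [attrs] -> rows
--
--     for each row in dataset:
--         put row in dictionary[row[attrs]]
--
--     result = all(len(group) >= k for group in dictionary)
--     '''
--     for row in dataset:
--         key = []
--         for attr in attrs:
--             key.append(str(row[attr]))
--
--         key = "-".join(key)
--         if key not in groups:
--             groups[key] = []
--
--         groups[key].append(row)
--
--     result = True
--     for group in groups:
--         if len(groups[group]) < k: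
--             result = False
--             break
--
--     return result
-- ===== SOURCE B (Python) =====
-- def is_k_anon(dataset, attrs, k):
--     keys = sorted("-".join(str(row[attr]) for attr in attrs) for row in dataset)
--     if not keys:
--         return True
--     cur, cnt = keys[0], 1
--     for key in keys[1:]:
--         if key == cur:
--             cnt += 1
--         else:
--             if cnt < k:
--                 return False
--             cur, cnt = key, 1
--     return cnt >= k
-- ===== Notes on version B (the rewrite author's own statement) =====
-- stated objective: alternative
-- what changed: Replaces the dict-of-lists grouping with sort-then-run-scan: the joined key of each row is computed, the key list is sorted, and a single scan counts each run of equal keys, failing as soon as a run shorter than k finishes.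
import Mathlib
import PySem

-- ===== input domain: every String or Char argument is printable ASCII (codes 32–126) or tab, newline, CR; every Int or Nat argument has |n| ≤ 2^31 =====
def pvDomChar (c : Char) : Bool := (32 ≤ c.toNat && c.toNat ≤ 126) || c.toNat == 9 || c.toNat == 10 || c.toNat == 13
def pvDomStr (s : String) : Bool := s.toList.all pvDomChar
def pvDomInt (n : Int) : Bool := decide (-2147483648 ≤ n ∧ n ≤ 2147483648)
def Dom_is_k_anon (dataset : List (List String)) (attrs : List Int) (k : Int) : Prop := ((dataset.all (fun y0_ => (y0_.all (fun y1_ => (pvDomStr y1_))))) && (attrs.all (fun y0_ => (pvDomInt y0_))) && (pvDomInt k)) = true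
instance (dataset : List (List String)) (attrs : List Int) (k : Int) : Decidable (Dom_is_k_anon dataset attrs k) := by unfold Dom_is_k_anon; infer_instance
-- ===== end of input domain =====

-- B replaces A's dict-of-lists grouping by sorting the joined row keys and scanning the runs
-- of equal keys once (objective: alternative algorithm, same result).

-- ===== PORT A =====
-- 'for group in groups: if len(groups[group]) < k: result = False; break' — the loop over the
-- dict's keys with early break.
def pvCheckA (k : Int) (d : PySem.Dict String (List (List String))) : List String → Bool
  | [] => true
  | g :: rest => if ((d.getD g []).length : Int) < k then false else pvCheckA k d rest

def is_k_anon (dataset : List (List String)) (attrs : List Int) (k : Int) : Bool :=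
  let groups : PySem.Dict String (List (List String)) :=
    dataset.foldl (fun g row =>
      -- key = []; for attr in attrs: key.append(str(row[attr])); key = "-".join(key)
      let key := PySem.Str.join "-" (attrs.foldl (fun acc attr => acc ++ [PySem.List.pyGetD row attr ""]) [])
      -- if key not in groups: groups[key] = []
      let g := if g.contains key then g else g.insert key []
      -- groups[key].append(row)
      g.modify key [] (fun l => l ++ [row])) PySem.Dict.empty
  pvCheckA k groups groups.keys

-- ===== PORT B =====
def pvKeyB (attrs : List Int) (row : List String) : String :=
  PySem.Str.join "-" (attrs.map (fun attr => PySem.List.pyGetD row attr ""))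

-- the scan over keys[1:], tracking the current key and its run count
def pvRunB (k : Int) (cur : String) (cnt : Int) : List String → Bool
  | [] => decide (cnt ≥ k)
  | key :: rest =>
      if key = cur then pvRunB k cur (cnt + 1) rest
      else if cnt < k then false
      else pvRunB k key 1 rest

def is_k_anon_alt (dataset : List (List String)) (attrs : List Int) (k : Int) : Bool :=
  match PySem.List.sorted (dataset.map (pvKeyB attrs)) (fun s => s) false with
  | [] => true
  | c :: rest => pvRunB k c 1 rest

-- ===== PRECONDITION & SPEC =====
-- Pre_ excludes exactly the inputs on which A raises IndexError: some attr out of range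
-- (Python-style, negative indices allowed) for some row.
def Pre_is_k_anon (dataset : List (List String)) (attrs : List Int) (k : Int) : Prop :=
  ∀ row ∈ dataset, ∀ attr ∈ attrs, PySem.Raise.InRange row.length attr
instance (dataset : List (List String)) (attrs : List Int) (k : Int) : Decidable (Pre_is_k_anon dataset attrs k) := by unfold Pre_is_k_anon; infer_instance

def pvWitness_is_k_anon : List (List String) × List Int × Int := ([["a", "b"], ["a", "c"]], [0], 2)

def Spec_is_k_anon (dataset : List (List String)) (attrs : List Int) (k : Int) (out : Bool) : Prop := out = is_k_anon_alt dataset attrs k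
instance (dataset : List (List String)) (attrs : List Int) (k : Int) (out : Bool) : Decidable (Spec_is_k_anon dataset attrs k out) := by unfold Spec_is_k_anon; infer_instance

-- ===== CLAIM (what is proved, stated in full; the proofs are below) =====
def Claim_equal_is_k_anon : Prop := ∀ (dataset : List (List String)) (attrs : List Int) (k : Int), Dom_is_k_anon dataset attrs k → Pre_is_k_anon dataset attrs k → Spec_is_k_anon dataset attrs k (is_k_anon dataset attrs k)

-- ===== LEMMAS AND PROOFS =====

-- A's key-building loop is the map in pvKeyB
theorem pvKeyA_eq (attrs : List Int) (row : List String) :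
    PySem.Str.join "-" (attrs.foldl (fun acc attr => acc ++ [PySem.List.pyGetD row attr ""]) []) = pvKeyB attrs row := by
  rw [PySem.List.foldl_append_singleton_eq_map]; rfl

-- A's compound loop body (insert-if-missing, then append) equals a single modify
theorem pvStepA_eq (g : PySem.Dict String (List (List String))) (key : String) (row : List String) :
    ((if g.contains key then g else g.insert key []).modify key [] (fun l => l ++ [row])) =
      g.modify key [] (fun l => l ++ [row]) := by
  by_cases h : g.contains key
  · simp [h]
  · have hf : g.contains key = false := by revert h; cases g.contains key <;> simp
    simp [hf, PySem.Dict.modify, PySem.Dict.getD_insert_self, PySem.Dict.insert_insert_self,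
      PySem.Dict.getD_of_not_contains g ([] : List (List String)) hf]

theorem pvCheckA_spec (k : Int) (d : PySem.Dict String (List (List String))) (gs : List String) :
    pvCheckA k d gs = decide (∀ g ∈ gs, ¬ (((d.getD g []).length : Int) < k)) := by
  induction gs with
  | nil => simp [pvCheckA]
  | cons g rest ih =>
      simp only [pvCheckA, ih]
      by_cases h : ((d.getD g []).length : Int) < k
      · simp [h]
      · simp [h]
        intro _
        omega

-- the run scan on a sorted tail checks the multiplicity of every key
theorem pvRunB_spec (k : Int) : ∀ (l : List String) (cur : String) (cnt : Int),
    l.Pairwise (· ≤ ·) → (∀ x ∈ l, cur ≤ x) →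
    pvRunB k cur cnt l =
      decide ((cnt + (l.count cur : Int) ≥ k) ∧ ∀ c ∈ l, c ≠ cur → ((l.count c : Int) ≥ k)) := by
  intro l
  induction l with
  | nil => intro cur cnt _ _; simp [pvRunB]
  | cons x t ih =>
      intro cur cnt hp hge
      have hpt : t.Pairwise (· ≤ ·) := hp.of_cons
      have hxt : ∀ y ∈ t, x ≤ y := fun y hy => (List.pairwise_cons.mp hp).1 y hy
      by_cases hx : x = cur
      · subst hx
        simp only [pvRunB, if_true]
        rw [ih x (cnt + 1) hpt hxt, decide_eq_decide]
        have hcnt : ((x :: t).count x : Int) = (t.count x : Int) + 1 := by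
          simp
        constructor
        · rintro ⟨h1, h2⟩
          refine ⟨by rw [hcnt]; omega, ?_⟩
          intro c hc hne
          rcases List.mem_cons.mp hc with rfl | hc
          · exact absurd rfl hne
          · have := h2 c hc hne
            rw [List.count_cons_of_ne (by exact fun h => hne h.symm)]
            exact this
        · rintro ⟨h1, h2⟩
          refine ⟨by rw [hcnt] at h1; omega, ?_⟩
          intro c hc hne
          have := h2 c (List.mem_cons_of_mem _ hc) hne
          rwa [List.count_cons_of_ne (by exact fun h => hne h.symm)] at this
      · have hcur : cur < x := lt_of_le_of_ne (hge x (List.mem_cons_self)) (fun h => hx h.symm)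
        have hnin : ∀ y ∈ x :: t, y ≠ cur := by
          intro y hy
          rcases List.mem_cons.mp hy with rfl | hy'
          · exact hx
          · exact fun h => absurd (h ▸ hxt y hy') (not_le.mpr hcur)
        have hcount0 : (x :: t).count cur = 0 := by
          rw [List.count_eq_zero]
          exact fun h => (hnin cur h) rfl
        simp only [pvRunB, if_neg hx]
        by_cases hk : cnt < k
        · simp only [if_pos hk]
          symm
          rw [decide_eq_false_iff_not]
          rintro ⟨h1, _⟩
          rw [hcount0] at h1; omega
        · simp only [if_neg hk]
          rw [ih x 1 hpt hxt, decide_eq_decide]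
          have hcx : ((x :: t).count x : Int) = (t.count x : Int) + 1 := by simp
          constructor
          · rintro ⟨h1, h2⟩
            refine ⟨by rw [hcount0]; omega, ?_⟩
            intro c hc _
            by_cases hcx' : c = x
            · subst hcx'; rw [hcx]; omega
            · rcases List.mem_cons.mp hc with rfl | hc'
              · exact absurd rfl hcx'
              · have := h2 c hc' hcx'
                rw [List.count_cons_of_ne (fun h => hcx' h.symm)]
                exact this
          · rintro ⟨h1, h2⟩
            refine ⟨?_, ?_⟩
            · have := h2 x (List.mem_cons_self) hx
              rw [hcx] at this
              omega
            · intro c hc hne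
              have := h2 c (List.mem_cons_of_mem _ hc) (hnin c (List.mem_cons_of_mem _ hc))
              rwa [List.count_cons_of_ne (fun h => hne h.symm)] at this

-- A equals "every key's multiplicity is ≥ k"
theorem isKAnon_A_char (dataset : List (List String)) (attrs : List Int) (k : Int) :
    is_k_anon dataset attrs k =
      decide (∀ c ∈ dataset.map (pvKeyB attrs), (((dataset.map (pvKeyB attrs)).count c : Int) ≥ k)) := by
  unfold is_k_anon
  have hstep : (fun (g : PySem.Dict String (List (List String))) row =>
      let key := PySem.Str.join "-" (attrs.foldl (fun acc attr => acc ++ [PySem.List.pyGetD row attr ""]) [])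
      let g := if g.contains key then g else g.insert key []
      g.modify key [] (fun l => l ++ [row])) =
      (fun g row => g.modify (pvKeyB attrs row) [] (fun l => l ++ [row])) := by
    funext g row
    simp only [pvKeyA_eq]
    exact pvStepA_eq g (pvKeyB attrs row) row
  rw [hstep, pvCheckA_spec]
  set d := dataset.foldl (fun g row => g.modify (pvKeyB attrs row) [] (fun l => l ++ [row])) PySem.Dict.empty with hd
  have hd' : d = (dataset.map (fun r => (pvKeyB attrs r, r))).foldl
      (fun d p => d.modify p.1 [] (fun l => l ++ [p.2])) PySem.Dict.empty := by
    rw [List.foldl_map]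
  have hkeys : d.keys = PySem.Set.ofList (dataset.map (pvKeyB attrs)) := by
    rw [hd]
    have := PySem.Dict.keys_foldl_modify_key (l := dataset) (key := pvKeyB attrs)
      (d0 := ([] : List (List String))) (f := fun d row l => l ++ [row]) (d := PySem.Dict.empty)
    simpa [PySem.Set.update_empty] using this
  have hlen : ∀ c, (d.getD c []).length = (dataset.map (pvKeyB attrs)).count c := by
    intro c
    rw [hd', PySem.Dict.getD_foldl_modify_append, List.filter_map]
    simp [List.count, List.countP_map, Function.comp_def, ← List.countP_eq_length_filter]
  rw [hkeys, decide_eq_decide]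
  constructor
  · intro h c hc
    have := h c (by rw [PySem.Set.mem_ofList]; exact hc)
    rw [hlen] at this; omega
  · intro h c hc
    rw [PySem.Set.mem_ofList] at hc
    have := h c hc
    rw [hlen]; omega

-- B equals the same characterisation
theorem isKAnon_B_char (dataset : List (List String)) (attrs : List Int) (k : Int) :
    is_k_anon_alt dataset attrs k =
      decide (∀ c ∈ dataset.map (pvKeyB attrs), (((dataset.map (pvKeyB attrs)).count c : Int) ≥ k)) := by
  unfold is_k_anon_alt
  set ks := dataset.map (pvKeyB attrs) with hks
  have hperm : (PySem.List.sorted ks (fun s => s) false).Perm ks := PySem.List.sorted_perm ks _ _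
  have hpw : (PySem.List.sorted ks (fun s => s) false).Pairwise (· ≤ ·) := by
    simpa using PySem.List.sorted_pairwise ks (fun s => s)
  rcases hs : PySem.List.sorted ks (fun s => s) false with _ | ⟨c, rest⟩
  · have hnil : ks = [] := by
      have := hperm.symm; rw [hs] at this; simpa using this.eq_nil
    simp [hnil]
  · rw [hs] at hperm hpw
    have hpt : rest.Pairwise (· ≤ ·) := hpw.of_cons
    have hge : ∀ x ∈ rest, c ≤ x := fun x hx => (List.pairwise_cons.mp hpw).1 x hx
    show pvRunB k c 1 rest = _
    rw [pvRunB_spec k rest c 1 hpt hge, decide_eq_decide]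
    have hcountc : ks.count c = rest.count c + 1 := by
      rw [← hperm.count_eq]; simp
    have hcount : ∀ x, x ≠ c → ks.count x = rest.count x := by
      intro x hx
      rw [← hperm.count_eq, List.count_cons_of_ne (fun h => hx h.symm)]
    have hmem : ∀ x, x ∈ ks ↔ x = c ∨ x ∈ rest := by
      intro x; rw [← hperm.mem_iff]; simp
    constructor
    · rintro ⟨h1, h2⟩ x hx
      by_cases hxc : x = c
      · subst hxc; rw [hcountc]; push_cast; omega
      · rcases (hmem x).mp hx with h | h
        · exact absurd h hxc
        · rw [hcount x hxc]; exact h2 x h hxc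
    · intro h
      refine ⟨?_, ?_⟩
      · have := h c ((hmem c).mpr (Or.inl rfl))
        rw [hcountc] at this; push_cast at this ⊢; omega
      · intro x hx hxc
        have := h x ((hmem x).mpr (Or.inr hx))
        rwa [hcount x hxc] at this

-- ===== VERDICT (by name: the statement is the Claim_ definition above) =====
theorem is_k_anon_spec : Claim_equal_is_k_anon := by
  intro dataset attrs k _ _
  unfold Spec_is_k_anon
  rw [isKAnon_A_char, isKAnon_B_char]
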